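-- pv_equiv track=rewrite | github.com/Kakarlamonika913/Geeks-for-geeks | Palindrome sum.py | isSumPalindrome
-- ===== SOURCE A (Python) =====
-- def isSumPalindrome (n):
--
--     # code here
--
--     def reverse(n):
--
--         rev_num = 0
--
--         while n > 0:
--
--             rev_num = rev_num*10 + n%10
--
--             n = n//10
--
--         return rev_num
--
--
--
--     def isPalindrome(n):
--
--         return reverse(n) == n
--
--
--
--
--
--     count = 0
--
--     while ((isPalindrome(n) == False) and count<5):
--
--         k = reverse(n)
--
--         n += k
--
--         count += 1
--
--
--
--     if isPalindrome(n):
--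
--         return n
--
--     return -1
-- ===== SOURCE B (Python) =====
-- def isSumPalindrome(n):
--     # Negative numbers can never become palindromes by this process.
--     if n < 0:
--         return -1
--     # Build the whole 6-element reverse-and-add orbit up front, with no
--     # per-round palindrome check.  The reverse of a number is read off its
--     # decimal string as a positional sum: the digit at string index i
--     # (most significant first) carries weight 10**i in the reversed number.
--     orbit = [n]
--     for _ in range(5):
--         m = orbit[-1]
--         rev = 0
--         p = 1
--         for c in str(m):
--             rev += (ord(c) - 48) * p
--             p *= 10
--         orbit.append(m + rev)
--     # The answer is the first palindrome in the orbit, if any.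
--     return next((m for m in orbit if str(m) == str(m)[::-1]), -1)
-- ===== Notes on version B (the rewrite author's own statement) =====
-- stated objective: alternative
-- what changed: A interleaves testing and stepping (while not palindrome and count<5 do one arithmetic reverse-and-add, palindrome test by a second arithmetic reversal); B stages the computation: it unconditionally materialises the whole 6-element reverse-and-add orbit, reading each reverse off the decimal string as a positional weighted sum, and then a separate scan returns the first palindromic orbit member (palindromicity = string symmetry), -1 if none; negatives are answered -1 up front.
import Mathlib
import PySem

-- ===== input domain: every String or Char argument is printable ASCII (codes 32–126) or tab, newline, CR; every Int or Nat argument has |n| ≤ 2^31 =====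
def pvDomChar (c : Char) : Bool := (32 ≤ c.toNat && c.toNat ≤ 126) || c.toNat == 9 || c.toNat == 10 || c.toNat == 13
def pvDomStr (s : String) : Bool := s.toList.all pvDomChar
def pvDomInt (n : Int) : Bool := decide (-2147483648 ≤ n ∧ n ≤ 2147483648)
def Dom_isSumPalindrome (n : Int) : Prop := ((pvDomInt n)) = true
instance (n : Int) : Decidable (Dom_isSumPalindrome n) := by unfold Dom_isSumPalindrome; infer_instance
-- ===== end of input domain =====

-- B restructures A's test-then-step while loop into staged passes: it materialises the whole
-- 6-element reverse-and-add orbit up front (each reverse read off the decimal string as a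
-- positional weighted sum) and then a separate scan returns the first palindromic member
-- (string symmetry), -1 for negatives up front; objective: alternative.
-- Loops are transliterated with a fuel argument that only makes the recursion total (always sufficient).

-- ===== PORT A =====
-- while n > 0: rev_num = rev_num*10 + n%10; n = n//10   (fuel bounds the iteration count)
def pvRevLoopF : Nat → Int → Int → Int
  | 0, rev_num, _ => rev_num
  | fuel + 1, rev_num, n =>
    if n > 0 then pvRevLoopF fuel (rev_num * 10 + PySem.Int.mod n 10) (PySem.Int.floordiv n 10)
    else rev_num

def pvRevLoop (rev_num n : Int) : Int := pvRevLoopF (n.toNat + 1) rev_num n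

def pvIsPal (n : Int) : Bool := pvRevLoop 0 n == n

-- while isPalindrome(n) == False and count < 5: k = reverse(n); n += k; count += 1
def pvLoopAF : Nat → Int → Int → Int
  | 0, n, _ => n
  | fuel + 1, n, count =>
    if pvIsPal n = false ∧ count < 5 then pvLoopAF fuel (n + pvRevLoop 0 n) (count + 1)
    else n

def pvLoopA (n count : Int) : Int := pvLoopAF ((5 - count).toNat + 1) n count

def isSumPalindrome (n : Int) : Int :=
  let m := pvLoopA n 0
  if pvIsPal m then m else -1

-- ===== PORT B =====
-- rev = 0; p = 1; for c in str(m): rev += (ord(c) - 48) * p; p *= 10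
-- (ord(c) is ported by hand as c.toNat — exact, str(m) produces ASCII chars only)
def pvRevStr (m : Int) : Int :=
  ((PySem.Int.toChars m).foldl
    (fun (st : Int × Int) c => (st.1 + ((c.toNat : Int) - 48) * st.2, st.2 * 10)) (0, 1)).1

-- for _ in range(5): m = orbit[-1]; … ; orbit.append(m + rev)   (fuel = the 5 rounds)
def pvOrbitLoop : Nat → List Int → List Int
  | 0, orbit => orbit
  | f + 1, orbit =>
    let m := PySem.List.pyGetD orbit (-1) 0
    pvOrbitLoop f (orbit ++ [m + pvRevStr m])

-- str(m) == str(m)[::-1]   (the [::-1] string slice is exactly reversal, ported via the char list)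
def pvPalStr (m : Int) : Bool := PySem.Int.toChars m == (PySem.Int.toChars m).reverse

-- next((m for m in orbit if …), -1) = first orbit member passing the test, else -1
def isSumPalindrome_alt (n : Int) : Int :=
  if n < 0 then -1
  else ((pvOrbitLoop 5 [n]).find? pvPalStr).getD (-1)

-- ===== PRECONDITION & SPEC =====
def Spec_isSumPalindrome (n : Int) (out : Int) : Prop := out = isSumPalindrome_alt n
instance (n : Int) (out : Int) : Decidable (Spec_isSumPalindrome n out) := by unfold Spec_isSumPalindrome; infer_instance

-- ===== CLAIM (what is proved, stated in full; the proofs are below) =====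
def Claim_equal_isSumPalindrome : Prop := ∀ (n : Int), Dom_isSumPalindrome n → Spec_isSumPalindrome n (isSumPalindrome n)

-- ===== LEMMAS AND PROOFS =====

-- Any fuel at least n.toNat + 1 lets A's reverse loop run to completion.
theorem pvRevLoopF_irrel : ∀ (f g : Nat) (a n : Int), n.toNat < f → n.toNat < g →
    pvRevLoopF f a n = pvRevLoopF g a n := by
  intro f
  induction f with
  | zero => intro g a n hf; omega
  | succ f ih =>
    intro g a n hf hg
    match g, hg with
    | g + 1, _ =>
      simp only [pvRevLoopF]
      by_cases h : n > 0
      · rw [if_pos h, if_pos h]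
        refine ih g _ _ ?_ ?_ <;>
          (rw [PySem.Int.floordiv_eq_ediv_of_pos (by omega)]; omega)
      · rw [if_neg h, if_neg h]

theorem pvRevLoopF_succ (f : Nat) (a n : Int) :
    pvRevLoopF (f + 1) a n =
      if n > 0 then pvRevLoopF f (a * 10 + PySem.Int.mod n 10) (PySem.Int.floordiv n 10) else a :=
  rfl

-- A's reverse loop's one-step unfolding.
theorem pvRevLoop_eq (a n : Int) :
    pvRevLoop a n =
      if n > 0 then pvRevLoop (a * 10 + PySem.Int.mod n 10) (PySem.Int.floordiv n 10) else a := by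
  unfold pvRevLoop
  rw [pvRevLoopF_succ]
  by_cases h : n > 0
  · rw [if_pos h, if_pos h]
    exact pvRevLoopF_irrel n.toNat ((PySem.Int.floordiv n 10).toNat + 1)
      (a * 10 + PySem.Int.mod n 10) (PySem.Int.floordiv n 10)
      (by rw [PySem.Int.floordiv_eq_ediv_of_pos (by omega)]; omega) (by omega)
  · rw [if_neg h, if_neg h]

-- A's reverse loop does nothing on non-positive numbers.
theorem pvRevLoop_nonpos (a : Int) {n : Int} (h : ¬ n > 0) : pvRevLoop a n = a := by
  rw [pvRevLoop_eq, if_neg h]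

-- Proof-only helper: the little-endian digit list of n, used to relate both reverses to Nat.digits.
def pvDigitsF : Nat → List Int → Int → List Int
  | 0, ds, _ => ds
  | fuel + 1, ds, m =>
    if m > 0 then pvDigitsF fuel (ds ++ [PySem.Int.mod m 10]) (PySem.Int.floordiv m 10)
    else ds

def pvDigits (ds : List Int) (m : Int) : List Int := pvDigitsF (m.toNat + 1) ds m

-- The digit-collecting helper is accumulator-independent.
theorem pvDigitsF_acc : ∀ (f : Nat) (ds : List Int) (m : Int),
    pvDigitsF f ds m = ds ++ pvDigitsF f [] m := by
  intro f
  induction f with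
  | zero => intro ds m; simp [pvDigitsF]
  | succ f ih =>
    intro ds m
    simp only [pvDigitsF]
    by_cases h : m > 0
    · rw [if_pos h, if_pos h, ih (ds ++ [PySem.Int.mod m 10]), ih ([] ++ [PySem.Int.mod m 10])]
      simp
    · rw [if_neg h, if_neg h]
      simp

-- Folding the little-endian digit list big-endian-style is exactly A's reverse loop.
theorem pvFoldF_eq_revLoopF : ∀ (f : Nat) (a m : Int),
    (pvDigitsF f [] m).foldl (fun r d => r * 10 + d) a = pvRevLoopF f a m := by
  intro f
  induction f with
  | zero => intro a m; rfl
  | succ f ih =>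
    intro a m
    simp only [pvDigitsF, pvRevLoopF]
    by_cases h : m > 0
    · rw [if_pos h, if_pos h, pvDigitsF_acc]
      simpa using ih (a * 10 + PySem.Int.mod m 10) (PySem.Int.floordiv m 10)
    · rw [if_neg h, if_neg h]
      rfl

theorem pvFold_eq_revLoop (m a : Int) :
    (pvDigits [] m).foldl (fun r d => r * 10 + d) a = pvRevLoop a m :=
  pvFoldF_eq_revLoopF (m.toNat + 1) a m

-- The helper digit list of a nonnegative number is Mathlib's base-10 digit string, cast to Int.
theorem pvDigitsF_digits : ∀ (f : Nat) (m : Nat), m < f →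
    pvDigitsF f [] (m : Int) = (Nat.digits 10 m).map Int.ofNat := by
  intro f
  induction f with
  | zero => intro m h; omega
  | succ f ih =>
    intro m hmf
    by_cases h : 0 < m
    · have h10 : PySem.Int.floordiv (m : Int) 10 = ((m / 10 : Nat) : Int) := by
        rw [PySem.Int.floordiv_eq_ediv_of_pos (by omega)]
        omega
      have hm10 : PySem.Int.mod (m : Int) 10 = ((m % 10 : Nat) : Int) := by
        rw [PySem.Int.mod_eq_emod_of_pos (by omega)]
        omega
      simp only [pvDigitsF]
      rw [if_pos (by exact_mod_cast h), pvDigitsF_acc, h10, hm10, ih (m / 10) (by omega),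
        Nat.digits_def' (by norm_num : (1:Nat) < 10) h]
      simp [Int.ofNat_eq_natCast]
    · have hm : m = 0 := by omega
      subst hm
      simp only [pvDigitsF]
      rw [if_neg (by norm_num)]
      simp

theorem pvDigits_eq_digits (m : Nat) :
    pvDigits [] (m : Int) = (Nat.digits 10 m).map Int.ofNat := by
  unfold pvDigits
  exact pvDigitsF_digits _ m (by omega)

-- Casting a Nat digit fold to Int.
theorem fold_cast (l : List Nat) (a : Nat) :
    (l.map Int.ofNat).foldl (fun r d => r * 10 + d) ((a : Nat) : Int)
      = ((l.foldl (fun r d => r * 10 + d) a : Nat) : Int) := by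
  induction l generalizing a with
  | nil => rfl
  | cons d t ih =>
    simp only [List.map_cons, List.foldl_cons, Int.ofNat_eq_natCast]
    rw [show ((a : Int) * 10 + (d : Int) = ((a * 10 + d : Nat) : Int)) by push_cast; ring]
    exact ih (a * 10 + d)

-- A Nat-side big-endian fold is ofDigits of the reversed list.
theorem fold_eq_ofDigits (l : List Nat) (a : Nat) :
    l.foldl (fun r d => r * 10 + d) a = a * 10 ^ l.length + Nat.ofDigits 10 l.reverse := by
  induction l generalizing a with
  | nil => simp
  | cons d t ih =>
    rw [List.foldl_cons, ih, List.reverse_cons, Nat.ofDigits_append]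
    simp only [Nat.ofDigits_singleton, List.length_reverse, List.length_cons]
    ring

-- A's reverse of a nonnegative number is ofDigits of the reversed digit string.
theorem revLoop_ofDigits (m : Nat) :
    pvRevLoop 0 (m : Int) = ((Nat.ofDigits 10 (Nat.digits 10 m).reverse : Nat) : Int) := by
  rw [← pvFold_eq_revLoop, pvDigits_eq_digits, show (0 : Int) = ((0 : Nat) : Int) from rfl,
    fold_cast, fold_eq_ofDigits]
  simp

-- Crux: the arithmetic reverse of m equals m exactly when m's digit string is symmetric.
theorem ofDigits_reverse_eq_iff (m : Nat) :
    Nat.ofDigits 10 (Nat.digits 10 m).reverse = m ↔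
      (Nat.digits 10 m).reverse = Nat.digits 10 m := by
  constructor
  · intro h
    cases hL : Nat.digits 10 m with
    | nil => simp
    | cons d0 t =>
      have hm0 : m ≠ 0 := Nat.digits_ne_nil_iff_ne_zero.mp (by rw [hL]; simp)
      rw [hL] at h
      by_cases hd0 : d0 = 0
      · exfalso
        subst hd0
        rw [List.reverse_cons, Nat.ofDigits_append_zero] at h
        have hub : Nat.ofDigits 10 t.reverse < 10 ^ t.reverse.length :=
          Nat.ofDigits_lt_base_pow_length (by norm_num)
            (fun x hx => Nat.digits_lt_base (by norm_num)
              (by rw [hL]; exact List.mem_cons_of_mem _ (List.mem_reverse.mp hx)))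
        have hlb : 10 ^ (Nat.digits 10 m).length ≤ 10 * m :=
          Nat.base_pow_length_digits_le 10 m (by norm_num) hm0
        rw [hL] at hlb
        simp only [List.length_cons, List.length_reverse] at hlb hub
        rw [h] at hub
        rw [pow_succ] at hlb
        set X := 10 ^ t.length with hX
        omega
      · have hlt' : ∀ x ∈ (d0 :: t).reverse, x < 10 := fun x hx =>
          Nat.digits_lt_base (by norm_num) (by rw [hL]; exact List.mem_reverse.mp hx)
        have hlast : ∀ hh : (d0 :: t).reverse ≠ [], (d0 :: t).reverse.getLast hh ≠ 0 := by
          intro hh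
          rw [List.getLast_reverse]
          simpa using hd0
        have hdig := Nat.digits_ofDigits 10 (by norm_num) ((d0 :: t).reverse) hlt' hlast
        rw [h] at hdig
        exact hdig.symm.trans hL
  · intro h
    rw [h, Nat.ofDigits_digits]

-- A's reverse of a nonnegative number is nonnegative.
theorem pvRevLoopF_nonneg : ∀ (f : Nat) (n a : Int), 0 ≤ a → 0 ≤ pvRevLoopF f a n := by
  intro f
  induction f with
  | zero => intro n a ha; exact ha
  | succ f ih =>
    intro n a ha
    simp only [pvRevLoopF]
    by_cases h : n > 0
    · rw [if_pos h]
      exact ih _ _ (by have := PySem.Int.mod_nonneg n (b := 10) (by norm_num); omega)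
    · rw [if_neg h]; exact ha

theorem pvRevLoop_nonneg (n a : Int) (ha : 0 ≤ a) : 0 ≤ pvRevLoop a n :=
  pvRevLoopF_nonneg (n.toNat + 1) n a ha

-- ---- characterising B's string primitives ----

-- On nonnegative numbers toChars is core's decimal printer.
theorem toChars_natCast (m : Nat) : PySem.Int.toChars (m : Int) = Nat.toDigits 10 m := by
  simp [PySem.Int.toChars]

-- A digit's printed character, numerically.
theorem digitChar_toNat (d : Nat) (h : d < 10) : (Nat.digitChar d).toNat = 48 + d := by
  interval_cases d <;> rfl

-- Core's printer emits the base-10 digit string, most significant first.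
theorem toDigitsCore_digits : ∀ (f m : Nat) (ds : List Char), 0 < m → m < f →
    Nat.toDigitsCore 10 f m ds = ((Nat.digits 10 m).map Nat.digitChar).reverse ++ ds := by
  intro f
  induction f with
  | zero => intro m ds h hf; omega
  | succ f ih =>
    intro m ds h hf
    rw [Nat.digits_def' (by norm_num : (1:Nat) < 10) h]
    by_cases h0 : m / 10 = 0
    · simp [Nat.toDigitsCore, h0]
    · have : Nat.toDigitsCore 10 (f + 1) m ds
          = Nat.toDigitsCore 10 f (m / 10) (Nat.digitChar (m % 10) :: ds) := by
        simp [Nat.toDigitsCore, h0]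
      rw [this, ih (m / 10) _ (by omega) (by omega)]
      simp

theorem toDigits_pos (m : Nat) (h : 0 < m) :
    Nat.toDigits 10 m = ((Nat.digits 10 m).map Nat.digitChar).reverse := by
  unfold Nat.toDigits
  rw [toDigitsCore_digits (m + 1) m [] h (by omega)]
  simp

-- B's weighted positional fold over a printed digit list, with running weight p.
theorem foldCV (l : List Nat) (hl : ∀ d ∈ l, d < 10) (a p : Int) :
    ((l.map Nat.digitChar).foldl
      (fun (st : Int × Int) c => (st.1 + ((c.toNat : Int) - 48) * st.2, st.2 * 10)) (a, p)).1
      = a + p * ((Nat.ofDigits 10 l : Nat) : Int) := by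
  induction l generalizing a p with
  | nil => simp
  | cons d t ih =>
    have hd : (Nat.digitChar d).toNat = 48 + d := digitChar_toNat d (hl d (by simp))
    simp only [List.map_cons, List.foldl_cons]
    rw [ih (fun x hx => hl x (by simp [hx]))]
    rw [Nat.ofDigits_cons]
    push_cast [hd]
    ring

-- B's string reverse equals A's arithmetic reverse on nonnegative numbers.
theorem revStr_eq (m : Nat) : pvRevStr (m : Int) = pvRevLoop 0 (m : Int) := by
  by_cases h : 0 < m
  · unfold pvRevStr
    rw [toChars_natCast, toDigits_pos m h, ← List.map_reverse,
      foldCV _ (fun d hd => Nat.digits_lt_base (by norm_num) (List.mem_reverse.mp hd)) 0 1,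
      revLoop_ofDigits]
    ring
  · have : m = 0 := by omega
    subst this
    decide

-- B's string palindrome test equals A's arithmetic one on nonnegative numbers.
theorem palStr_iff (m : Nat) : pvPalStr (m : Int) = pvIsPal (m : Int) := by
  by_cases h : 0 < m
  · rw [Bool.eq_iff_iff]
    unfold pvPalStr pvIsPal
    rw [toChars_natCast, toDigits_pos m h, revLoop_ofDigits]
    simp only [beq_iff_eq, List.reverse_reverse]
    set L := Nat.digits 10 m with hLdef
    have hdig : ∀ d ∈ L, d < 10 := fun d hd => Nat.digits_lt_base (by norm_num) hd
    have hmap : L.map (Char.toNat ∘ Nat.digitChar) = L.map (fun d => 48 + d) :=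
      List.map_congr_left (fun d hd => digitChar_toNat d (hdig d hd))
    constructor
    · intro hrev
      have hc := congrArg (List.map Char.toNat) hrev
      rw [List.map_reverse, List.map_map, hmap, ← List.map_reverse] at hc
      have hLL : L.reverse = L :=
        List.map_injective_iff.mpr (fun a b hab => by omega) hc
      exact_mod_cast (ofDigits_reverse_eq_iff m).mpr hLL
    · intro hpal
      have hLL : L.reverse = L :=
        (ofDigits_reverse_eq_iff m).mp (by exact_mod_cast hpal)
      rw [← List.map_reverse, hLL]
  · have : m = 0 := by omega
    subst this
    decide

-- Int-level wrappers for use along the orbit (all members are nonnegative).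
theorem revStr_eq' (n : Int) (h : 0 ≤ n) : pvRevStr n = pvRevLoop 0 n := by
  obtain ⟨m, rfl⟩ := Int.eq_ofNat_of_zero_le h
  exact revStr_eq m

theorem palStr_iff' (n : Int) (h : 0 ≤ n) : pvPalStr n = pvIsPal n := by
  obtain ⟨m, rfl⟩ := Int.eq_ofNat_of_zero_le h
  exact palStr_iff m

-- ---- B's orbit loop and scan, recursively ----

-- The orbit loop only reads and extends the last element, so a prefix is inert.
theorem pvOrbitLoop_append : ∀ (f : Nat) (l : List Int) (x : Int),
    pvOrbitLoop f (l ++ [x]) = l ++ pvOrbitLoop f [x] := by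
  intro f
  induction f with
  | zero => intro l x; rfl
  | succ f ih =>
    intro l x
    have h1 : PySem.List.pyGetD ([x] : List Int) (-1) 0 = x :=
      PySem.List.pyGetD_neg_one_append_singleton [] x 0
    simp only [pvOrbitLoop]
    rw [PySem.List.pyGetD_neg_one_append_singleton l x 0, h1, ih (l ++ [x]), ih [x]]
    simp

-- First palindrome in the orbit of x with f additions, else -1 (proof-only helper).
def pvFirstPal (f : Nat) (x : Int) : Int := ((pvOrbitLoop f [x]).find? pvPalStr).getD (-1)

theorem pvFirstPal_zero (x : Int) :
    pvFirstPal 0 x = if pvPalStr x then x else -1 := by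
  unfold pvFirstPal pvOrbitLoop
  by_cases h : pvPalStr x <;> simp [List.find?, h]

theorem pvFirstPal_succ (f : Nat) (x : Int) :
    pvFirstPal (f + 1) x = if pvPalStr x then x else pvFirstPal f (x + pvRevStr x) := by
  unfold pvFirstPal
  have h1 : PySem.List.pyGetD ([x] : List Int) (-1) 0 = x :=
    PySem.List.pyGetD_neg_one_append_singleton [] x 0
  simp only [pvOrbitLoop]
  rw [h1, pvOrbitLoop_append f [x] (x + pvRevStr x)]
  by_cases h : pvPalStr x <;> simp [h]

-- ---- A's while loop ----

-- A's while-loop: fuel at least the remaining iteration count gives the same result.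
theorem pvLoopAF_irrel : ∀ (f g : Nat) (n c : Int), (5 - c).toNat ≤ f → (5 - c).toNat ≤ g →
    pvLoopAF f n c = pvLoopAF g n c := by
  intro f
  induction f with
  | zero =>
    intro g n c hf hg
    match g with
    | 0 => rfl
    | g + 1 =>
      simp only [pvLoopAF]
      rw [if_neg (fun hc => by have := hc.2; omega)]
  | succ f ih =>
    intro g n c hf hg
    match g with
    | 0 =>
      simp only [pvLoopAF]
      rw [if_neg (fun hc => by have := hc.2; omega)]
    | g + 1 =>
      simp only [pvLoopAF]
      by_cases h : pvIsPal n = false ∧ c < 5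
      · rw [if_pos h, if_pos h]
        exact ih g _ (c + 1) (by have := h.2; omega) (by have := h.2; omega)
      · rw [if_neg h, if_neg h]

theorem pvLoopAF_succ (f : Nat) (n c : Int) :
    pvLoopAF (f + 1) n c =
      if pvIsPal n = false ∧ c < 5 then pvLoopAF f (n + pvRevLoop 0 n) (c + 1) else n :=
  rfl

-- A's while-loop one-step unfolding.
theorem pvLoopA_eq (n c : Int) :
    pvLoopA n c =
      if pvIsPal n = false ∧ c < 5 then pvLoopA (n + pvRevLoop 0 n) (c + 1) else n := by
  unfold pvLoopA
  rw [pvLoopAF_succ]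
  by_cases h : pvIsPal n = false ∧ c < 5
  · rw [if_pos h, if_pos h]
    exact pvLoopAF_irrel (5 - c).toNat ((5 - (c + 1)).toNat + 1) (n + pvRevLoop 0 n) (c + 1)
      (by omega) (by omega)
  · rw [if_neg h, if_neg h]

-- On a negative input A's loop only adds zero five times.
theorem pvLoopAF_neg : ∀ (f : Nat) (n c : Int), n < 0 → pvLoopAF f n c = n := by
  intro f
  induction f with
  | zero => intro n c _; rfl
  | succ f ih =>
    intro n c hn
    simp only [pvLoopAF]
    by_cases h : pvIsPal n = false ∧ c < 5
    · rw [if_pos h, pvRevLoop_nonpos 0 (by omega), add_zero]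
      exact ih n (c + 1) hn
    · rw [if_neg h]

theorem pvLoopA_neg (n : Int) (c : Int) (hn : n < 0) : pvLoopA n c = n :=
  pvLoopAF_neg _ n c hn

-- Main loop correspondence: A's while loop plus final test is B's orbit scan.
theorem loop_eq (f : Nat) (n : Int) (hn : 0 ≤ n) (hf : 1 ≤ f) (hf6 : f ≤ 6) :
    (if pvIsPal (pvLoopA n (6 - (f : Int))) then pvLoopA n (6 - (f : Int)) else -1)
      = pvFirstPal (f - 1) n := by
  match f, hf with
  | 1, _ =>
    have hstop : ¬(pvIsPal n = false ∧ (6:Int) - ((1:Nat):Int) < 5) := fun hc => by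
      have := hc.2; omega
    rw [pvLoopA_eq, if_neg hstop]
    rw [show (1 : Nat) - 1 = 0 from rfl, pvFirstPal_zero, palStr_iff' n hn]
  | (g + 2), _ =>
    rw [show (g + 2) - 1 = g + 1 from rfl, pvFirstPal_succ, palStr_iff' n hn,
      revStr_eq' n hn]
    by_cases hp : pvIsPal n = true
    · have hstop : ¬(pvIsPal n = false ∧ (6:Int) - (((g + 2 : Nat)) : Int) < 5) := fun hc => by
        simp [hp] at hc
      rw [pvLoopA_eq, if_neg hstop, if_pos hp, if_pos hp]
    · have hstep : pvLoopA n (6 - ((g:Int) + 2)) = pvLoopA (n + pvRevLoop 0 n) (6 - ((g:Int) + 1)) := by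
        rw [pvLoopA_eq, if_pos ⟨by simpa using hp, by omega⟩]
        congr 1
        omega
      rw [show ((g + 2 : Nat) : Int) = (g:Int) + 2 by push_cast; ring, hstep, if_neg hp]
      have := loop_eq (g + 1) (n + pvRevLoop 0 n)
        (by have := pvRevLoop_nonneg n 0 le_rfl; omega) (by omega) (by omega)
      rw [show ((6:Int) - ((g:Int) + 1)) = (6 - ((g + 1 : Nat) : Int)) by push_cast; ring]
      simpa using this

-- ===== VERDICT (by name: the statement is the Claim_ definition above) =====
theorem isSumPalindrome_spec : Claim_equal_isSumPalindrome := by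
  intro n _
  unfold Spec_isSumPalindrome isSumPalindrome isSumPalindrome_alt
  by_cases hn : n < 0
  · have hrev : pvRevLoop 0 n = 0 := pvRevLoop_nonpos 0 (by omega)
    rw [if_pos hn]
    simp only [pvLoopA_neg n 0 hn]
    rw [if_neg (by simp [pvIsPal, hrev]; omega)]
  · rw [if_neg hn]
    have := loop_eq 6 n (by omega) (by omega) (by omega)
    rw [show ((6:Nat) - 1) = 5 from rfl] at this
    unfold pvFirstPal at this
    simpa using this
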